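-- pv_equiv track=rewrite | github.com/nerpatech/trac_mcp_server | src/trac_mcp_server/mcp/resources/wiki.py | _format_page_tree
-- ===== SOURCE A (Python) =====
-- from typing import Any
--
-- def _format_page_tree(pages: list[str]) -> str:
--     """Format page list as hierarchical tree with box-drawing characters.
--
--     Args:
--         pages: List of page names (e.g., ["WikiStart", "Dev/Setup", "Dev/Testing"])
--
--     Returns:
--         Tree structure string with box-drawing connectors
--
--     Example output:
--         Dev
--         |-- Setup
--         `-- Testing
--         WikiStart
--     """
--     if not pages:
--         return ""
--
--     # Build nested dict structure
--     tree: dict[str, Any] = {}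
--     for page in sorted(pages):
--         parts = page.split("/")
--         current = tree
--         for part in parts:
--             if part not in current:
--                 current[part] = {}
--             current = current[part]
--
--     # Format tree recursively
--     lines: list[str] = []
--     _format_tree_node(tree, "", lines, is_last=True, is_root=True)
--     return "\n".join(lines)
--
-- def _format_tree_node(
--     node: dict[str, Any],
--     prefix: str,
--     lines: list[str],
--     is_last: bool,
--     is_root: bool = False,
-- ) -> None:
--     """Recursively format tree node with box-drawing characters.
--
--     Args:
--         node: Dict representing tree node (children as nested dicts)
--         prefix: Current line prefix for indentation
--         lines: Output lines list (mutated)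
--         is_last: Whether this is the last sibling
--         is_root: Whether this is the root node
--     """
--     keys = sorted(node.keys())
--
--     for i, key in enumerate(keys):
--         is_last_child = i == len(keys) - 1
--
--         if is_root:
--             # Root level - no connector
--             lines.append(key)
--             child_prefix = ""
--         else:
--             # Nested level - add connector
--             connector = "`-- " if is_last_child else "|-- "
--             lines.append(f"{prefix}{connector}{key}")
--             # Continuation prefix for children
--             child_prefix = prefix + (
--                 "    " if is_last_child else "|   "
--             )
--
--         # Recurse into children
--         children = node[key]
--         if children:
--             _format_tree_node(
--                 children, child_prefix, lines, is_last_child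
--             )
-- ===== SOURCE B (Python) =====
-- from typing import Any
--
-- def _child_frames(node: dict[str, Any], prefix: str, is_root: bool) -> list:
--     """Frames (line, child, child_prefix, False) for node's children, in display order."""
--     items = sorted(node.items())
--     frames = []
--     for i, (key, child) in enumerate(items):
--         last = i == len(items) - 1
--         if is_root:
--             frames.append((key, child, "", False))
--         else:
--             frames.append((prefix + ("`-- " if last else "|-- ") + key,
--                            child,
--                            prefix + ("    " if last else "|   "),
--                            False))
--     return frames
--
-- def _format_page_tree(pages: list[str]) -> str:
--     """Format page list as hierarchical tree with box-drawing characters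
--     (iterative: one explicit stack, no recursive helper)."""
--     # Build nested dict structure
--     tree: dict[str, Any] = {}
--     for page in sorted(pages):
--         current = tree
--         for part in page.split("/"):
--             current = current.setdefault(part, {})
--
--     # Pre-order traversal with an explicit stack of (line, node, prefix, is_root) frames.
--     lines: list[str] = []
--     stack: list = [(None, tree, "", True)]
--     while stack:
--         line, node, prefix, is_root = stack.pop()
--         if line is not None:
--             lines.append(line)
--         stack.extend(reversed(_child_frames(node, prefix, is_root)))
--     return "\n".join(lines)
-- ===== Notes on version B (the rewrite author's own statement) =====
-- stated objective: alternative
-- what changed: The recursive _format_tree_node helper is replaced by a single explicit-stack loop over (line, node, prefix) frames that iterates sorted(node.items()) and pushes child frames in order, so the whole function is one iterative pass with no recursion and no per-key dict lookup.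
import Mathlib
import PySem

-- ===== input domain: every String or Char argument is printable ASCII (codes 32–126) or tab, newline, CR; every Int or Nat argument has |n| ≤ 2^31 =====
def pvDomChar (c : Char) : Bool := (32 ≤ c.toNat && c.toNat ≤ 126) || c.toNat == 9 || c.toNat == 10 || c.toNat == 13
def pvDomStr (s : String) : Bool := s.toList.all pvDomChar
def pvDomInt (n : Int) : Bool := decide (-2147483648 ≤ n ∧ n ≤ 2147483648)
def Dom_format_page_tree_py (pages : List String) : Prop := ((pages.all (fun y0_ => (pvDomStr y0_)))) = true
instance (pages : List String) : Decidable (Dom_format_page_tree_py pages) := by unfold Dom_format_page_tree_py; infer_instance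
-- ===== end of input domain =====

-- B replaces the recursive _format_tree_node helper by a single explicit-stack loop over
-- (line, node, prefix) frames iterating sorted(node.items()); same return value, no side effects.

-- The nested dict[str, Any] tree (both Pythons build it identically, by in-place mutation
-- through a `current` pointer): a forest is a list of (key, child-forest) pairs in insertion
-- order.  Encoded as a non-nested inductive: cons key child rest.
inductive PForest where
  | nil : PForest
  | cons : String → PForest → PForest → PForest
deriving DecidableEq, Repr

def PForest.size : PForest → Nat
  | .nil => 0
  | .cons _ c r => 1 + c.size + r.size

-- `current[part]` (first match; nil when absent — used only where Python guarantees presence)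
def PForest.get : PForest → String → PForest
  | .nil, _ => .nil
  | .cons k c r, x => if k == x then c else r.get x

-- `current[part] = v`: overwrite first match in place, append a new key at the end
def PForest.set : PForest → String → PForest → PForest
  | .nil, x, v => .cons x v .nil
  | .cons k c r, x, v => if k == x then .cons k v r else .cons k c (r.set x v)

-- `node.items()` in insertion order
def PForest.entries : PForest → List (String × PForest)
  | .nil => []
  | .cons k c r => (k, c) :: r.entries

-- `node.keys()` in insertion order
def PForest.keysF (t : PForest) : List String := t.entries.map Prod.fst

-- the inner `for part in parts:` descent of the build loop (shared by both Pythons verbatim: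
-- A's `if part not in current: current[part] = {}` / `current = current[part]` and B's
-- `current = current.setdefault(part, {})` perform exactly this functional update)
def pvInsertPath : PForest → List String → PForest
  | t, [] => t
  | t, p :: ps => t.set p (pvInsertPath (t.get p) ps)

-- ===== PORT A =====
-- port of _format_tree_node (lines is an output accumulator in Python: the port returns the
-- appended lines); the is_last parameter is kept although, as in the Python, it is never read.
-- fuel makes the recursion structural; fuel = node.size always suffices (every recursive call
-- goes to a strictly smaller child and spends one unit), proved in the lemmas below.
def fmtNodeA : Nat → PForest → String → Bool → Bool → List String
  | 0, _, _, _, _ => []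
  | fuel + 1, node, pre, _is_last, is_root =>
    let keys := PySem.List.sorted node.keysF (fun k => k) false
    (PySem.List.enumerate keys 0).flatMap (fun x =>
      let is_last_child : Bool := x.1 == (keys.length : Int) - 1
      let line := if is_root then x.2
                  else pre ++ (if is_last_child then "`-- " else "|-- ") ++ x.2
      let child_prefix := if is_root then ""
                          else pre ++ (if is_last_child then "    " else "|   ")
      let children := node.get x.2
      line :: (if children ≠ PForest.nil then fmtNodeA fuel children child_prefix is_last_child false
               else []))

def format_page_tree_py (pages : List String) : String :=
  if pages = [] then ""
  else
    let tree := (PySem.List.sorted pages (fun p => p) false).foldl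
      (fun t page => pvInsertPath t ((PySem.Str.split? page "/").getD [])) .nil
    PySem.Str.join "\n" (fmtNodeA tree.size tree "" true true)

-- PORT B helper (the inner `for i, (key, child) in enumerate(items)` loop of _child_frames):
-- the child frames pushed when a stack frame for `node` is expanded
def pvChildFrames (node : PForest) (pre : String) (is_root : Bool) :
    List (Option String × PForest × String × Bool) :=
  (PySem.List.enumerate (PySem.List.sorted node.entries (fun e => e.1) false) 0).map (fun e =>
    let last : Bool := e.1 == ((PySem.List.sorted node.entries (fun e => e.1) false).length : Int) - 1
    if is_root then (some e.2.1, e.2.2, "", false)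
    else (some (pre ++ (if last then "`-- " else "|-- ") ++ e.2.1), e.2.2,
          pre ++ (if last then "    " else "|   "), false))

-- ===== PORT B =====
-- the while loop: the Lean list head is the TOP of the Python stack (stack.pop() pops the
-- end, stack.extend(reversed(frames)) puts frames[0] on top — i.e. frames ++ rest here);
-- lines is the output accumulator.  sorted(node.items()) never compares two dicts because a
-- dict's keys are distinct, so it is exactly a sort by key (first component).  fuel makes the
-- loop structural; fuel = Σ stored sizes + stack length suffices (each iteration strictly
-- decreases that measure), proved in the lemmas below.
def fmtStackBF : Nat → List (Option String × PForest × String × Bool) → List String → List String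
  | _, [], lines => lines
  | 0, _ :: _, lines => lines
  | fuel + 1, (line, node, pre, is_root) :: rest, lines =>
    let lines' := match line with
      | some l => lines ++ [l]
      | none => lines
    fmtStackBF fuel (pvChildFrames node pre is_root ++ rest) lines'

def fmtStackB (st : List (Option String × PForest × String × Bool)) (lines : List String) :
    List String :=
  fmtStackBF ((st.map (fun f => f.2.1.size)).sum + st.length) st lines

def format_page_tree_py_alt (pages : List String) : String :=
  let tree := (PySem.List.sorted pages (fun p => p) false).foldl
    (fun t page => pvInsertPath t ((PySem.Str.split? page "/").getD [])) .nil
  PySem.Str.join "\n" (fmtStackB [(none, tree, "", true)] [])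

-- ===== PRECONDITION & SPEC =====
def Spec_format_page_tree_py (pages : List String) (out : String) : Prop := out = format_page_tree_py_alt pages
instance (pages : List String) (out : String) : Decidable (Spec_format_page_tree_py pages out) := by unfold Spec_format_page_tree_py; infer_instance

-- ===== CLAIM (what is proved, stated in full; the proofs are below) =====
def Claim_equal_format_page_tree_py : Prop := ∀ (pages : List String), Dom_format_page_tree_py pages → Spec_format_page_tree_py pages (format_page_tree_py pages)

-- ===== LEMMAS AND PROOFS =====

theorem keysF_nil : PForest.nil.keysF = [] := rfl

theorem keysF_cons (k : String) (c r : PForest) :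
    (PForest.cons k c r).keysF = k :: r.keysF := rfl

theorem PForest.entries_size (t : PForest) :
    (t.entries.map (fun p => p.2.size)).sum + t.entries.length = t.size := by
  induction t with
  | nil => simp [PForest.entries, PForest.size]
  | cons k c r ihc ihr => simp [PForest.entries, PForest.size]; omega

theorem PForest.entry_size_lt (t : PForest) (k : String) (c : PForest)
    (h : (k, c) ∈ t.entries) : c.size < t.size := by
  induction t with
  | nil => simp [PForest.entries] at h
  | cons k' c' r ihc ihr =>
    simp only [PForest.entries, List.mem_cons] at h
    rcases h with h | h
    · cases h; simp [PForest.size]; omega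
    · have := ihr h; simp [PForest.size]; omega

theorem pvChildFrames_sizes (node : PForest) (pre : String) (is_root : Bool) :
    ((pvChildFrames node pre is_root).map (fun f => f.2.1.size)).sum
      = (node.entries.map (fun p => p.2.size)).sum := by
  have hlist : (pvChildFrames node pre is_root).map (fun f => f.2.1.size)
      = (PySem.List.enumerate (PySem.List.sorted node.entries (fun e => e.1) false) 0).map
          (fun e => e.2.2.size) := by
    simp only [pvChildFrames, List.map_map]
    apply List.map_congr_left
    intro e _
    by_cases h : is_root = true <;> simp [h]
  rw [hlist]
  have h2 : (PySem.List.enumerate (PySem.List.sorted node.entries (fun e => e.1) false) 0).map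
      (fun e => e.2.2.size)
      = (PySem.List.sorted node.entries (fun e => e.1) false).map (fun p => p.2.size) := by
    conv_rhs => rw [← PySem.List.map_snd_enumerate
      (PySem.List.sorted node.entries (fun e => e.1) false) 0, List.map_map]
    rfl
  rw [h2]
  exact List.Perm.sum_eq (List.Perm.map _ (PySem.List.sorted_perm _ _ _))

theorem pvChildFrames_length (node : PForest) (pre : String) (is_root : Bool) :
    (pvChildFrames node pre is_root).length = node.entries.length := by
  simp [pvChildFrames, PySem.List.length_enumerate, PySem.List.length_sorted]

-- one stack step strictly decreases total stored size plus stack length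
theorem fmtB_dec (line : Option String) (node : PForest) (pre : String) (is_root : Bool)
    (rest : List (Option String × PForest × String × Bool)) :
    ((pvChildFrames node pre is_root ++ rest).map (fun f => f.2.1.size)).sum
      + (pvChildFrames node pre is_root ++ rest).length
    < (((line, node, pre, is_root) :: rest).map (fun f => f.2.1.size)).sum
      + ((line, node, pre, is_root) :: rest).length := by
  have hs := pvChildFrames_sizes node pre is_root
  have hl := pvChildFrames_length node pre is_root
  have h4 := PForest.entries_size node
  simp only [List.map_append, List.sum_append, List.length_append, List.map_cons,
    List.length_cons, List.sum_cons]
  omega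

-- membership in the enumerated sorted item list pins a child below the node's size
theorem nodeLines_dec (node : PForest) (x : Int × (String × PForest))
    (hx : x ∈ PySem.List.enumerate (PySem.List.sorted node.entries (fun e => e.1) false) 0) :
    x.2.2.size < node.size := by
  have hmem : x.2 ∈ PySem.List.sorted node.entries (fun e => e.1) false := by
    rw [← PySem.List.map_snd_enumerate (PySem.List.sorted node.entries (fun e => e.1) false) 0]
    exact List.mem_map_of_mem hx
  exact PForest.entry_size_lt node x.2.1 x.2.2 ((PySem.List.mem_sorted _ _ _ _).1 hmem)

-- canonical line list of a node: pre-order over the key-sorted items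
def nodeLines (node : PForest) (pre : String) (is_root : Bool) : List String :=
  let items := PySem.List.sorted node.entries (fun e => e.1) false
  (PySem.List.enumerate items 0).attach.flatMap (fun x =>
    let last : Bool := x.1.1 == (items.length : Int) - 1
    (if is_root then x.1.2.1 else pre ++ (if last then "`-- " else "|-- ") ++ x.1.2.1)
      :: nodeLines x.1.2.2 (if is_root then "" else pre ++ (if last then "    " else "|   ")) false)
termination_by node.size
decreasing_by
  exact nodeLines_dec node x.1 x.2

def frameLines (f : Option String × PForest × String × Bool) : List String :=
  (match f.1 with | some l => [l] | none => []) ++ nodeLines f.2.1 f.2.2.1 f.2.2.2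

-- distinct keys at every level (the dict invariant)
def wfKeys : PForest → Prop
  | .nil => True
  | .cons k c r => k ∉ r.keysF ∧ wfKeys c ∧ wfKeys r

theorem wf_nodup (t : PForest) (h : wfKeys t) : t.keysF.Nodup := by
  induction t with
  | nil => simp [keysF_nil]
  | cons k c r ihc ihr =>
    simp only [wfKeys] at h
    obtain ⟨hk, hc, hr⟩ := h
    rw [keysF_cons]
    exact List.Nodup.cons hk (ihr hr)

theorem wf_child (t : PForest) (h : wfKeys t) (k : String) (c : PForest)
    (hm : (k, c) ∈ t.entries) : wfKeys c := by
  induction t with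
  | nil => simp [PForest.entries] at hm
  | cons k' c' r ihc ihr =>
    simp only [wfKeys] at h
    obtain ⟨hk', hc, hr⟩ := h
    simp only [PForest.entries, List.mem_cons] at hm
    rcases hm with hm | hm
    · cases hm; exact hc
    · exact ihr hr hm

theorem wf_get_eq (t : PForest) (h : wfKeys t) (k : String) (c : PForest)
    (hm : (k, c) ∈ t.entries) : t.get k = c := by
  induction t with
  | nil => simp [PForest.entries] at hm
  | cons k' c' r ihc ihr =>
    simp only [wfKeys] at h
    obtain ⟨hk', hc, hr⟩ := h
    simp only [PForest.entries, List.mem_cons] at hm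
    simp only [PForest.get]
    rcases hm with hm | hm
    · obtain ⟨rfl, rfl⟩ := Prod.mk.injEq .. ▸ hm
      simp
    · have hne : k' ≠ k := by
        intro he
        subst he
        exact hk' (by simpa [PForest.keysF] using List.mem_map_of_mem hm (f := Prod.fst))
      simp only [beq_iff_eq, if_neg hne]
      exact ihr hr hm

theorem wf_get (t : PForest) (h : wfKeys t) (k : String) : wfKeys (t.get k) := by
  induction t with
  | nil => simp [PForest.get, wfKeys]
  | cons k' c' r ihc ihr =>
    simp only [wfKeys] at h
    obtain ⟨hk', hc, hr⟩ := h
    simp only [PForest.get]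
    split
    · exact hc
    · exact ihr hr

-- `part in current` (only the build invariant proofs need it)
def PForest.hasKey : PForest → String → Bool
  | .nil, _ => false
  | .cons k _ r, x => k == x || r.hasKey x

theorem keysF_set (t : PForest) (k : String) (v : PForest) :
    (t.set k v).keysF = if t.hasKey k then t.keysF else t.keysF ++ [k] := by
  induction t with
  | nil => simp [PForest.set, PForest.hasKey, keysF_nil, keysF_cons]
  | cons k' c r ihc ihr =>
    simp only [PForest.set, PForest.hasKey]
    by_cases he : k' = k
    · subst he
      simp [keysF_cons]
    · simp only [beq_iff_eq, if_neg he, keysF_cons, ihr]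
      have : (k' == k) = false := beq_false_of_ne he
      rw [this]
      split <;> simp_all

theorem wf_set (t : PForest) (h : wfKeys t) (k : String) (v : PForest) (hv : wfKeys v) :
    wfKeys (t.set k v) := by
  induction t with
  | nil => simp [PForest.set, wfKeys, keysF_nil, hv]
  | cons k' c r ihc ihr =>
    simp only [wfKeys] at h
    obtain ⟨hk', hc, hr⟩ := h
    simp only [PForest.set]
    by_cases he : k' = k
    · subst he
      simp only [beq_self_eq_true, if_pos]
      exact ⟨hk', hv, hr⟩
    · have hb : (k' == k) = false := beq_false_of_ne he
      simp only [hb, Bool.false_eq_true, if_false, wfKeys]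
      refine ⟨?_, hc, ihr hr⟩
      rw [keysF_set]
      split
      · exact hk'
      · simp [hk', he]

theorem wf_insertPath (t : PForest) (h : wfKeys t) (ps : List String) :
    wfKeys (pvInsertPath t ps) := by
  induction ps generalizing t with
  | nil => simpa [pvInsertPath] using h
  | cons p ps ih =>
    rw [pvInsertPath]
    exact wf_set t h p _ (ih _ (wf_get t h p))

theorem wf_build (l : List String) (t : PForest) (h : wfKeys t) :
    wfKeys (l.foldl (fun t page => pvInsertPath t ((PySem.Str.split? page "/").getD [])) t) := by
  induction l generalizing t with
  | nil => simpa using h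
  | cons p ps ih =>
    rw [List.foldl_cons]
    exact ih _ (wf_insertPath t h _)

-- sorted keys of a wf node are the first components of its sorted items
theorem sorted_keys_eq (t : PForest) (h : wfKeys t) :
    PySem.List.sorted t.keysF (fun k => k) false =
      (PySem.List.sorted t.entries (fun e => e.1) false).map Prod.fst := by
  apply PySem.List.sorted_eq_of_perm_of_pairwise_lt
  · exact List.Perm.map Prod.fst (PySem.List.sorted_perm t.entries (fun e => e.1) false)
  · have hle : List.Pairwise (fun a b : String => a ≤ b)
        ((PySem.List.sorted t.entries (fun e => e.1) false).map Prod.fst) :=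
      List.pairwise_map.mpr (PySem.List.sorted_pairwise t.entries (fun e => e.1))
    have hnd : ((PySem.List.sorted t.entries (fun e => e.1) false).map Prod.fst).Nodup := by
      refine List.Perm.nodup ?_ (wf_nodup t h)
      exact (List.Perm.map Prod.fst (PySem.List.sorted_perm t.entries (fun e => e.1) false)).symm
    exact (hle.and hnd).imp (fun hab => lt_of_le_of_ne hab.1 hab.2)

theorem flatMap_attach' {α β : Type} (xs : List α) (f : α → List β) :
    xs.attach.flatMap (fun x => f x.1) = xs.flatMap f := by
  conv_rhs => rw [← List.attach_map_subtype_val xs]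
  rw [List.flatMap_map]

theorem sorted_entries_nil :
    PySem.List.sorted (PForest.nil.entries) (fun e : String × PForest => e.1) false = [] :=
  (PySem.List.sorted_eq_nil_iff _ _ _).mpr rfl

theorem nodeLines_nil (pre : String) (is_root : Bool) : nodeLines .nil pre is_root = [] := by
  rw [nodeLines]
  simp [sorted_entries_nil]

theorem flatMap_congr_mem {α β : Type} (l : List α) (f g : α → List β)
    (h : ∀ x ∈ l, f x = g x) : l.flatMap f = l.flatMap g := by
  induction l with
  | nil => rfl
  | cons x xs ih =>
    simp only [List.flatMap_cons]
    rw [h x (List.mem_cons_self), ih (fun y hy => h y (List.mem_cons_of_mem x hy))]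

theorem enumerate_map {α β : Type} (l : List α) (f : α → β) (s : Int) :
    PySem.List.enumerate (l.map f) s =
      (PySem.List.enumerate l s).map (fun p => (p.1, f p.2)) := by
  induction l generalizing s with
  | nil => simp [PySem.List.enumerate_nil]
  | cons x xs ih => simp [PySem.List.enumerate_cons, ih]

theorem snd_mem_of_mem_enumerate {α : Type} {l : List α} {s : Int} {p : Int × α}
    (h : p ∈ PySem.List.enumerate l s) : p.2 ∈ l := by
  rcases (PySem.List.mem_enumerate_iff _ _ _).1 h with ⟨k, hk, rfl⟩
  exact List.getElem_mem hk

-- beta-expanded bodies of the two flatMaps (defeq to what unfolding fmtNodeA / nodeLines produces)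
def bodyA (fuel : Nat) (t : PForest) (pre : String) (is_root : Bool) (p : Int × String) : List String :=
  (if is_root then p.2
   else pre ++ (if p.1 == ((PySem.List.sorted t.keysF (fun k => k) false).length : Int) - 1
                then "`-- " else "|-- ") ++ p.2) ::
  (if t.get p.2 ≠ PForest.nil then
      fmtNodeA fuel (t.get p.2)
        (if is_root then ""
         else pre ++ (if p.1 == ((PySem.List.sorted t.keysF (fun k => k) false).length : Int) - 1
                      then "    " else "|   "))
        (p.1 == ((PySem.List.sorted t.keysF (fun k => k) false).length : Int) - 1) false
    else [])

def bodyB (t : PForest) (pre : String) (is_root : Bool) (p : Int × (String × PForest)) : List String :=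
  (if is_root then p.2.1
   else pre ++ (if p.1 == ((PySem.List.sorted t.entries (fun e => e.1) false).length : Int) - 1
                then "`-- " else "|-- ") ++ p.2.1) ::
  nodeLines p.2.2
    (if is_root then ""
     else pre ++ (if p.1 == ((PySem.List.sorted t.entries (fun e => e.1) false).length : Int) - 1
                  then "    " else "|   ")) false

-- A's formatter (with sufficient fuel) computes nodeLines on wf trees (for any unused is_last)
theorem fmtNodeA_eq_aux (fuel : Nat) : ∀ (t : PForest), t.size ≤ fuel → wfKeys t →
    ∀ (pre : String) (is_last is_root : Bool),
      fmtNodeA fuel t pre is_last is_root = nodeLines t pre is_root := by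
  induction fuel with
  | zero =>
    intro t hsz h pre is_last is_root
    cases t with
    | nil => rw [nodeLines_nil]; rfl
    | cons k c r => simp [PForest.size] at hsz
  | succ n ih =>
    intro t hsz h pre is_last is_root
    rw [fmtNodeA, nodeLines]
    show (PySem.List.enumerate (PySem.List.sorted t.keysF (fun k => k) false) 0).flatMap
          (fun x => bodyA n t pre is_root x)
        = (PySem.List.enumerate (PySem.List.sorted t.entries (fun e => e.1) false) 0).attach.flatMap
          (fun x => bodyB t pre is_root x.1)
    rw [flatMap_attach']
    rw [sorted_keys_eq t h, enumerate_map, List.flatMap_map]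
    apply flatMap_congr_mem
    intro e he
    unfold bodyA bodyB
    have hmem : e.2 ∈ PySem.List.sorted t.entries (fun e => e.1) false :=
      snd_mem_of_mem_enumerate he
    have hment : e.2 ∈ t.entries := (PySem.List.mem_sorted _ _ _ _).1 hmem
    have hget : t.get e.2.1 = e.2.2 := wf_get_eq t h e.2.1 e.2.2 (by simpa using hment)
    have hwfc : wfKeys e.2.2 := wf_child t h e.2.1 e.2.2 (by simpa using hment)
    have hszc : e.2.2.size ≤ n := by
      have := PForest.entry_size_lt t e.2.1 e.2.2 (by simpa using hment)
      omega
    rw [sorted_keys_eq t h]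
    simp only [List.length_map, hget]
    congr 1
    by_cases hc : e.2.2 = PForest.nil
    · rw [hc]
      simp [nodeLines_nil]
    · simp only [ne_eq, hc, not_false_eq_true, if_true]
      exact ih e.2.2 hszc hwfc _ _ _

theorem fmtNodeA_eq (t : PForest) (h : wfKeys t) (pre : String) (is_last is_root : Bool) :
    fmtNodeA t.size t pre is_last is_root = nodeLines t pre is_root :=
  fmtNodeA_eq_aux t.size t le_rfl h pre is_last is_root

-- the frames pushed for one node flush to exactly that node's lines
theorem frames_flatMap (node : PForest) (pre : String) (is_root : Bool) :
    List.flatMap frameLines (pvChildFrames node pre is_root) = nodeLines node pre is_root := by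
  rw [nodeLines]
  show _ = (PySem.List.enumerate (PySem.List.sorted node.entries (fun e => e.1) false) 0).attach.flatMap
      (fun x => bodyB node pre is_root x.1)
  rw [flatMap_attach']
  simp only [pvChildFrames]
  rw [List.flatMap_map]
  apply flatMap_congr_mem
  intro e _
  unfold bodyB frameLines
  by_cases h : is_root = true <;> simp [h]

-- B's stack loop (with sufficient fuel) flushes each frame in order
theorem fmtStackBF_eq (fuel : Nat) : ∀ (st : List (Option String × PForest × String × Bool))
    (lines : List String), (st.map (fun f => f.2.1.size)).sum + st.length ≤ fuel →
    fmtStackBF fuel st lines = lines ++ st.flatMap frameLines := by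
  induction fuel with
  | zero =>
    intro st lines h
    cases st with
    | nil => simp [fmtStackBF]
    | cons f r => simp at h
  | succ n ih =>
    intro st lines h
    cases st with
    | nil => simp [fmtStackBF]
    | cons f rest =>
      obtain ⟨line, node, pre, is_root⟩ := f
      have hd := fmtB_dec line node pre is_root rest
      have hle : ((pvChildFrames node pre is_root ++ rest).map (fun f => f.2.1.size)).sum
          + (pvChildFrames node pre is_root ++ rest).length ≤ n := by
        simp only [List.map_cons, List.sum_cons, List.length_cons] at h hd ⊢
        omega
      cases line with
      | some l =>
        rw [fmtStackBF, ih _ _ hle, List.flatMap_append, frames_flatMap]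
        simp [frameLines]
      | none =>
        rw [fmtStackBF, ih _ _ hle, List.flatMap_append, frames_flatMap]
        simp [frameLines]

theorem fmtStackB_eq (st : List (Option String × PForest × String × Bool)) (lines : List String) :
    fmtStackB st lines = lines ++ st.flatMap frameLines :=
  fmtStackBF_eq _ st lines le_rfl

-- ===== VERDICT (by name: the statement is the Claim_ definition above) =====
theorem format_page_tree_py_spec : Claim_equal_format_page_tree_py := by
  intro pages _
  unfold Spec_format_page_tree_py format_page_tree_py format_page_tree_py_alt
  have hwf : wfKeys ((PySem.List.sorted pages (fun p => p) false).foldl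
      (fun t page => pvInsertPath t ((PySem.Str.split? page "/").getD [])) .nil) :=
    wf_build _ _ trivial
  simp only [fmtStackB_eq, List.flatMap_cons, List.flatMap_nil, List.nil_append,
    List.append_nil, frameLines]
  rw [← fmtNodeA_eq _ hwf "" true true]
  by_cases hp : pages = []
  · subst hp
    rw [if_pos rfl]
    rw [(PySem.List.sorted_eq_nil_iff _ _ _).mpr rfl]
    rw [List.foldl_nil]
    rfl
  · rw [if_neg hp]
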